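-- pv_equiv track=rewrite | github.com/steves2j/LightingController | custom_components/s2j_led_driver/registry.py | _mask_to_index
-- ===== SOURCE A (Python) =====
-- def _mask_to_index(mask: int) -> int:
--     if mask <= 0 or (mask & (mask - 1)) != 0:
--         return 0
--     index = 0
--     while mask > 1:
--         mask >>= 1
--         index += 1
--     return index + 1
-- ===== SOURCE B (Python) =====
-- def _mask_to_index(mask: int) -> int:
--     if mask <= 0 or (mask & (mask - 1)) != 0:
--         return 0
--     return mask.bit_length()
-- ===== Notes on version B (the rewrite author's own statement) =====
-- stated objective: idiomatic
-- what changed: Replaces the shift-and-count while-loop with a closed-form int.bit_length() call after the same single-bit guard.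
import Mathlib
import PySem

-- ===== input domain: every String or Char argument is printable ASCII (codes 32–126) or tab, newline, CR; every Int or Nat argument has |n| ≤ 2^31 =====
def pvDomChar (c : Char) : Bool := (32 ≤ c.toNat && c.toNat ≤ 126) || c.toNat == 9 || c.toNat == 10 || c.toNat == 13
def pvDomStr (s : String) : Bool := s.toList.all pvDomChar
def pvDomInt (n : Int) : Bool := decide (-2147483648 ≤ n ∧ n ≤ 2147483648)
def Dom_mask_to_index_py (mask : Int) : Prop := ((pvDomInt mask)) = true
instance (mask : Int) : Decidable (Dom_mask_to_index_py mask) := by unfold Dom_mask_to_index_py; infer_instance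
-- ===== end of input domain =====

-- B replaces A's shift-and-count while-loop with a closed-form bit_length after the same guard (idiomatic).

-- ===== PORT A =====
-- '>>> 1' on a positive Int is floor division by 2 (cited by the port's termination proof)
theorem pvShiftR1 (m : Int) (h : 0 < m) : m >>> (1:Nat) = PySem.Int.floordiv m 2 := by
  cases m with
  | ofNat n =>
      simp [Int.shiftRight, PySem.Int.floordiv, Int.shiftRight_eq, Nat.shiftRight_eq_div_pow,
        Int.fdiv_eq_ediv]
  | negSucc n => exact absurd h (by omega)

-- the while-loop of A: while mask > 1: mask >>= 1; index += 1
def maskLoop (mask : Int) (index : Int) : Int :=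
  if h : mask > 1 then maskLoop (mask >>> (1:Nat)) (index + 1) else index
termination_by mask.toNat
decreasing_by
  rw [pvShiftR1 mask (by omega)]
  simp only [PySem.Int.floordiv]
  rw [Int.fdiv_eq_ediv]
  simp
  omega

def mask_to_index_py (mask : Int) : Int :=
  if mask ≤ 0 ∨ PySem.Int.band mask (mask - 1) ≠ 0 then 0
  else maskLoop mask 0 + 1

-- ===== PORT B =====
def mask_to_index_py_alt (mask : Int) : Int :=
  if mask ≤ 0 ∨ PySem.Int.band mask (mask - 1) ≠ 0 then 0
  else (PySem.Int.bitLength mask : Int)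

-- ===== PRECONDITION & SPEC =====
def Spec_mask_to_index_py (mask : Int) (out : Int) : Prop := out = mask_to_index_py_alt mask
instance (mask : Int) (out : Int) : Decidable (Spec_mask_to_index_py mask out) := by unfold Spec_mask_to_index_py; infer_instance

-- ===== CLAIM (what is proved, stated in full; the proofs are below) =====
def Claim_equal_mask_to_index_py : Prop := ∀ (mask : Int), Dom_mask_to_index_py mask → Spec_mask_to_index_py mask (mask_to_index_py mask)

-- ===== LEMMAS AND PROOFS =====

-- for every positive mask, A's loop (started at index) computes index + bitLength mask - 1
theorem maskLoop_bitLength (mask : Int) (hm : 0 < mask) (index : Int) :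
    maskLoop mask index = index + (PySem.Int.bitLength mask : Int) - 1 := by
  rw [maskLoop]
  split_ifs with h
  · have hpos : 0 < PySem.Int.floordiv mask 2 := by
      simp only [PySem.Int.floordiv]
      rw [Int.fdiv_eq_ediv]; simp; omega
    have := maskLoop_bitLength (mask >>> (1:Nat)) (by rw [pvShiftR1 mask (by omega)]; exact hpos) (index + 1)
    rw [this, pvShiftR1 mask (by omega), PySem.Int.bitLength_of_pos hm]
    push_cast
    ring
  · have h1 : mask = 1 := by omega
    subst h1
    rw [show PySem.Int.bitLength 1 = 1 from rfl]
    ring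
termination_by mask.toNat
decreasing_by
  rw [pvShiftR1 mask (by omega)]
  simp only [PySem.Int.floordiv]
  rw [Int.fdiv_eq_ediv]
  simp
  omega

-- ===== VERDICT (by name: the statement is the Claim_ definition above) =====
theorem mask_to_index_py_spec : Claim_equal_mask_to_index_py := by
  intro mask _
  unfold Spec_mask_to_index_py mask_to_index_py mask_to_index_py_alt
  split_ifs with h
  · rfl
  · push Not at h
    rw [maskLoop_bitLength mask (by omega) 0]
    ring
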